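-- pv_equiv track=rewrite | github.com/dan1elt0m/sqlfluff-pyspark | src/sqlfluff_pyspark/lint.py | _count_leading_newlines
-- ===== SOURCE A (Python) =====
-- def _count_leading_newlines(value: str) -> int:
--     count = 0
--     for char in value:
--         if char == "\n":
--             count += 1
--         elif char.isspace():
--             continue
--         else:
--             break
--     return count
-- ===== SOURCE B (Python) =====
-- def _count_leading_newlines(value: str) -> int:
--     prefix = value[: len(value) - len(value.lstrip())]
--     return prefix.count("\n")
-- ===== Notes on version B (the rewrite author's own statement) =====
-- stated objective: simpler
-- what changed: Replaces the char-by-char loop with branching (count/skip/break) by slicing off the maximal leading-whitespace prefix via lstrip and counting newlines in it with str.count.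
import Mathlib
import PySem

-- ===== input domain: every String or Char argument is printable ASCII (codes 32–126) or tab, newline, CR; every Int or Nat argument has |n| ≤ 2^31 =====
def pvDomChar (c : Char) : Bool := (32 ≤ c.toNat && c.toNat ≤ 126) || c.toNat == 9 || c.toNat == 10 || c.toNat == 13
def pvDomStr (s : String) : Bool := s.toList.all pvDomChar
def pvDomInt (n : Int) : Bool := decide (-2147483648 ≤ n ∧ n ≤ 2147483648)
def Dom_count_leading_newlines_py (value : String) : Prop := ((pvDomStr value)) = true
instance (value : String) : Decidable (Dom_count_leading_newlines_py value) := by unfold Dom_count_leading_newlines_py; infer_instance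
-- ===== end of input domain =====

-- B replaces A's single counting loop (count/skip/break branches) by slicing off the
-- leading-whitespace prefix with lstrip and counting '\n' in that prefix (simpler decomposition).

-- ===== PORT A =====
-- the for-loop with break, as structural recursion over the characters with the count accumulator
def countLoopA : List Char → Int → Int
  | [], count => count
  | ch :: rest, count =>
    if ch == '\n' then countLoopA rest (count + 1)
    else if PySem.Chars.isspace ch then countLoopA rest count
    else count

def count_leading_newlines_py (value : String) : Int :=
  countLoopA value.toList 0

-- ===== PORT B =====
def count_leading_newlines_py_alt (value : String) : Int :=
  let pfx := PySem.Str.slice value none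
    (some ((PySem.Str.len value : Int) - (PySem.Str.len (PySem.Str.lstrip value) : Int)))
  (PySem.Str.count pfx "\n" : Int)

-- ===== PRECONDITION & SPEC =====
def Spec_count_leading_newlines_py (value : String) (out : Int) : Prop := out = count_leading_newlines_py_alt value
instance (value : String) (out : Int) : Decidable (Spec_count_leading_newlines_py value out) := by unfold Spec_count_leading_newlines_py; infer_instance

-- ===== CLAIM (what is proved, stated in full; the proofs are below) =====
def Claim_equal_count_leading_newlines_py : Prop := ∀ (value : String), Dom_count_leading_newlines_py value → Spec_count_leading_newlines_py value (count_leading_newlines_py value)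

-- ===== LEMMAS AND PROOFS =====

-- Chars.count with a single-character needle is List.count
theorem chars_count_go_single (c : Char) :
    ∀ (l : List Char) (fuel acc : Nat), l.length ≤ fuel →
      PySem.Chars.count.go [c] fuel l acc = acc + l.count c := by
  intro l
  induction l with
  | nil =>
      intro fuel acc _
      cases fuel <;> simp [PySem.Chars.count.go]
  | cons h t ih =>
      intro fuel acc hf
      cases fuel with
      | zero => simp at hf
      | succ n =>
        have ht : t.length ≤ n := by simpa using hf
        by_cases hhc : h = c
        · subst hhc
          have hp : List.isPrefixOf [h] (h :: t) = true := by simp [List.isPrefixOf]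
          simp only [PySem.Chars.count.go, hp, if_true]
          rw [show List.drop [h].length (h :: t) = t from rfl, ih n (acc + 1) ht,
            List.count_cons]
          simp; omega
        · have hp : List.isPrefixOf [c] (h :: t) = false := by
            simp [List.isPrefixOf]
            exact fun e => hhc e.symm
          simp only [PySem.Chars.count.go, hp]
          rw [ih n acc ht, List.count_cons]
          simp [hhc]

theorem chars_count_single (c : Char) (l : List Char) :
    PySem.Chars.count l [c] = l.count c := by
  simp [PySem.Chars.count, chars_count_go_single c l l.length 0 le_rfl]

-- A's loop counts '\n' within the maximal leading-whitespace run
theorem countLoopA_eq (l : List Char) (k : Int) :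
    countLoopA l k = k + ((l.takeWhile PySem.Chars.isspace).count '\n' : Int) := by
  induction l generalizing k with
  | nil => simp [countLoopA]
  | cons h t ih =>
      by_cases hn : h = '\n'
      · subst hn
        have hsp : PySem.Chars.isspace '\n' = true := by decide
        simp [countLoopA, List.takeWhile, hsp, ih]
        ring
      · by_cases hs : PySem.Chars.isspace h = true
        · simp [countLoopA, hn, hs, List.takeWhile, ih]
        · simp at hs
          simp [countLoopA, hn, hs, List.takeWhile]

-- B's sliced prefix is exactly the maximal leading-whitespace run
theorem b_slice_eq_takeWhile (value : String) :
    (PySem.Str.slice value none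
      (some ((PySem.Str.len value : Int) - (PySem.Str.len (PySem.Str.lstrip value) : Int)))).toList
      = value.toList.takeWhile PySem.Chars.isspace := by
  rw [PySem.Str.toList_slice, PySem.Str.len_eq, PySem.Str.len_eq, PySem.Str.toList_lstrip,
    PySem.Chars.slice_eq_listSlice]
  have hsplit := List.takeWhile_append_dropWhile (p := PySem.Chars.isspace) (l := value.toList)
  have hlen' : (List.takeWhile PySem.Chars.isspace value.toList).length
      + (PySem.Chars.lstrip value.toList).length = value.toList.length := by
    simp only [PySem.Chars.lstrip]
    conv_rhs => rw [← hsplit]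
    exact (List.length_append).symm
  have hcast : (value.toList.length : Int) - ((PySem.Chars.lstrip value.toList).length : Int)
      = (((List.takeWhile PySem.Chars.isspace value.toList).length : Nat) : Int) := by omega
  rw [hcast, PySem.List.slice_to_natCast]
  generalize List.takeWhile PySem.Chars.isspace value.toList = tw at hsplit ⊢
  rw [← hsplit]
  exact List.take_left

theorem b_eq_takeWhile (value : String) :
    count_leading_newlines_py_alt value
      = ((value.toList.takeWhile PySem.Chars.isspace).count '\n' : Int) := by
  have hs : ("\n" : String).toList = ['\n'] := by decide
  simp only [count_leading_newlines_py_alt, PySem.Str.count_eq, b_slice_eq_takeWhile, hs,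
    chars_count_single]

-- ===== VERDICT (by name: the statement is the Claim_ definition above) =====
theorem count_leading_newlines_py_spec : Claim_equal_count_leading_newlines_py := by
  intro value _
  unfold Spec_count_leading_newlines_py
  rw [b_eq_takeWhile, count_leading_newlines_py, countLoopA_eq]
  simp
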